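-- pv_equiv track=rewrite | github.com/PromasterGuru/Hackerrank-Solutions | The Hurdle Race/main.py | hurdleRace
-- ===== SOURCE A (Python) =====
-- def hurdleRace(k, height):
--     potions = 0
--     max = k
--     for i in height:
--         if(i > max):
--             potions += i - max
--             max = i
--     return potions
-- ===== SOURCE B (Python) =====
-- def hurdleRace(k, height):
--     if not height:
--         return 0
--     return max(0, max(height) - k)
-- ===== Notes on version B (the rewrite author's own statement) =====
-- stated objective: simpler
-- what changed: Replaced the running-max loop with per-element potion accumulation by a closed form: the potions telescope to max(0, max(height) - k), computed with one max reduction.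
import Mathlib
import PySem

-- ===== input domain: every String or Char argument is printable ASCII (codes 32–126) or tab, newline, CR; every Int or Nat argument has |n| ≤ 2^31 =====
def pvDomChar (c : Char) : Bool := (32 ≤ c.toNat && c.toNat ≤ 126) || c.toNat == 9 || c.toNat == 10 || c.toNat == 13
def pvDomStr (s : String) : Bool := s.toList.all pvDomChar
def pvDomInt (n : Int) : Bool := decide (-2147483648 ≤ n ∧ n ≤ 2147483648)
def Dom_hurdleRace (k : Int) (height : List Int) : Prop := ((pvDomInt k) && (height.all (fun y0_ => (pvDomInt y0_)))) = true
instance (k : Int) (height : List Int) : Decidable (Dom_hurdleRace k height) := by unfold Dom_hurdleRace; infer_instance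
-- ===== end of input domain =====

-- B replaces A's running-max accumulation loop with the closed form max(0, max(height) - k); simpler, same cost.


-- ===== PORT A =====
-- literal port: state (potions, max) updated per element, branch order as in A
def hurdleRace (k : Int) (height : List Int) : Int :=
  let s := height.foldl (fun (s : Int × Int) i =>
    if i > s.2 then (s.1 + (i - s.2), i) else s) (0, k)
  s.1

-- ===== PORT B =====
-- literal port of Source B: empty guard, then max(0, max(height) - k)
def hurdleRace_alt (k : Int) (height : List Int) : Int :=
  if height = [] then 0
  else
    match PySem.List.max? height (fun x => x) with
    | some m => max 0 (m - k)
    | none => 0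

-- ===== PRECONDITION & SPEC =====
def Spec_hurdleRace (k : Int) (height : List Int) (out : Int) : Prop := out = hurdleRace_alt k height
instance (k : Int) (height : List Int) (out : Int) : Decidable (Spec_hurdleRace k height out) := by unfold Spec_hurdleRace; infer_instance

-- ===== CLAIM (what is proved, stated in full; the proofs are below) =====
def Claim_equal_hurdleRace : Prop := ∀ (k : Int) (height : List Int), Dom_hurdleRace k height → Spec_hurdleRace k height (hurdleRace k height)

-- ===== LEMMAS AND PROOFS =====
-- A's loop telescopes: final potions = (running max over height seeded with m) - m
theorem hurdleRace_loop_eq (height : List Int) (p m : Int) :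
    (height.foldl (fun (s : Int × Int) i =>
      if i > s.2 then (s.1 + (i - s.2), i) else s) (p, m)).1
      = p + (height.foldl max m - m) := by
  induction height generalizing p m with
  | nil => simp
  | cons i t ih =>
    by_cases h : i > m
    · simp only [List.foldl_cons, if_pos h, ih]
      have : max m i = i := by omega
      rw [this]; ring
    · simp only [List.foldl_cons, if_neg h, ih]
      have : max m i = m := by omega
      rw [this]

-- the seed commutes out of a running max
theorem foldl_max_seed (t : List Int) (k x : Int) :
    t.foldl max (max k x) = max k (t.foldl max x) := by
  induction t generalizing x with
  | nil => simp
  | cons y s ih => simp only [List.foldl_cons, max_assoc, ih]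

-- ===== VERDICT (by name: the statement is the Claim_ definition above) =====
theorem hurdleRace_spec : Claim_equal_hurdleRace := by
  intro k height _
  unfold Spec_hurdleRace hurdleRace hurdleRace_alt
  simp only [hurdleRace_loop_eq]
  cases height with
  | nil => simp
  | cons x t =>
    simp only [PySem.List.max?_id_cons, List.foldl_cons, foldl_max_seed]
    have hx : x ≤ t.foldl max x := (PySem.List.le_foldl_max t x).1
    have : (x :: t) ≠ [] := by simp
    rw [if_neg this]
    omega
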